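-- pv_equiv track=rewrite | github.com/SeanBeseler/code-katas | mat.py | get_ul_top
-- ===== SOURCE A (Python) =====
-- def get_ul_top(matrix, h , w):
--     sum = 0
--     for p in range(w):
--         tsum =1
--         x =0
--         y = p
--         ex = True
--         while ex:
--             temp = matrix[x][y]
--             x = x + 1
--             y = y - 1
--             if x >= h or y < 0:
--                 ex = False
--             tsum = tsum * temp
--         sum = sum + tsum
--     return sum
-- ===== SOURCE B (Python) =====
-- def get_ul_top(matrix, h, w):
--     if w <= 0:
--         return 0
--     prod = [1] * w
--     for i in range(min(h, w)):
--         row = matrix[i]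
--         prod = [prod[j] * row[j - i] if j >= i else prod[j] for j in range(w)]
--     return sum(prod)
-- ===== Notes on version B (the rewrite author's own statement) =====
-- stated objective: alternative
-- what changed: A walks each of the w anti-diagonals independently with an inner while loop; B makes a single row-major pass over the first min(h, w) rows, folding every cell into a per-diagonal product table of width w, then sums the table.
-- intended difference: On inputs with h <= 0 and w > 0, A's read-before-check while loop still multiplies matrix[0][p] once per column and returns the sum of the first w entries of row 0, while B reads no rows and returns w (each of the w diagonal products is empty, hence 1); B's is intended because a matrix of nonpositive height has no cells on any diagonal. — e.g. on get_ul_top([[2, 3]], 0, 2): A returns 5, B returns 2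
import Mathlib
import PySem

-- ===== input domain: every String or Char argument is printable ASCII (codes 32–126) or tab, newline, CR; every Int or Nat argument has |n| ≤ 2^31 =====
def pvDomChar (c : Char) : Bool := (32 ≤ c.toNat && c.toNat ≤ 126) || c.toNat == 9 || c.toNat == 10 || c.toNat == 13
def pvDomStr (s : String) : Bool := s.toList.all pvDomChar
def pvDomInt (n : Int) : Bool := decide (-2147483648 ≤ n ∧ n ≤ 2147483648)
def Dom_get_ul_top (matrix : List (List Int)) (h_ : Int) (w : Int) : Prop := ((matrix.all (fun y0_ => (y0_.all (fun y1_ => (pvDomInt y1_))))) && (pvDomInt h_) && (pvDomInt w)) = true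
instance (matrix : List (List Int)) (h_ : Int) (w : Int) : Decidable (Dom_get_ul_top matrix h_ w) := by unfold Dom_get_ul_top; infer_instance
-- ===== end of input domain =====

-- B replaces A's w independent diagonal walks by one row-major pass over the first
-- min(h, w) rows that folds each cell into a per-diagonal product table, then sums
-- the table (objective: alternative); on h <= 0 with w > 0 the values differ (see D_).

-- cell read helper (shared by both ports; in-range under Pre_)
def pvCell (m : List (List Int)) (x y : Nat) : Int := (m.getD x []).getD y 0

-- ===== PORT A =====
-- the inner while loop: state (x, y, tsum); reads first, then steps and tests
def pvLoopA (m : List (List Int)) (h_ : Int) : Nat → Nat → Int → Int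
  | x, y, tsum =>
    let tsum' := tsum * pvCell m x y
    if h_ ≤ (x : Int) + 1 ∨ y = 0 then tsum'
    else pvLoopA m h_ (x + 1) (y - 1) tsum'
  termination_by _ y _ => y
  decreasing_by omega

def get_ul_top (matrix : List (List Int)) (h_ : Int) (w : Int) : Int :=
  (List.range w.toNat).foldl (fun s p => s + pvLoopA matrix h_ 0 p 1) 0

-- ===== PORT B =====
def get_ul_top_alt (matrix : List (List Int)) (h_ : Int) (w : Int) : Int :=
  if w ≤ 0 then 0
  else
    let prod := (List.range (min h_ w).toNat).foldl
      (fun prod i =>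
        let row := matrix.getD i []
        (List.range w.toNat).map
          (fun j => if i ≤ j then prod.getD j 0 * row.getD (j - i) 0 else prod.getD j 0))
      (List.replicate w.toNat 1)
    prod.sum

-- ===== PRECONDITION & SPEC =====
-- Pre_ holds exactly when every cell A reads is in range (A reads rows
-- 0 .. min(max h 1, w)-1 — row 0 even when h <= 0 — and row x up to column w-1-x),
-- i.e. exactly when Python A returns instead of raising IndexError.
def Pre_get_ul_top (matrix : List (List Int)) (h_ : Int) (w : Int) : Prop :=
  w ≤ 0 ∨ ((min (max h_ 1) w).toNat ≤ matrix.length ∧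
    ∀ x ∈ List.range (min (min (max h_ 1) w).toNat matrix.length),
      w.toNat - x ≤ (matrix.getD x []).length)
instance (matrix : List (List Int)) (h_ : Int) (w : Int) : Decidable (Pre_get_ul_top matrix h_ w) := by
  unfold Pre_get_ul_top; infer_instance

def pvWitness_get_ul_top : List (List Int) × Int × Int := ([[1, 2], [3, 4]], 2, 2)

-- On h <= 0 with w > 0, A's read-before-check loop still multiplies matrix[0][p] once
-- per column and returns the sum of the first w entries of row 0; B reads no rows and
-- returns w (w empty products), the intended value for a matrix of nonpositive height.
def D_get_ul_top (matrix : List (List Int)) (h_ : Int) (w : Int) : Prop :=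
  h_ ≤ 0 ∧ 0 < w
instance (matrix : List (List Int)) (h_ : Int) (w : Int) : Decidable (D_get_ul_top matrix h_ w) := by
  unfold D_get_ul_top; infer_instance

def Spec_get_ul_top (matrix : List (List Int)) (h_ : Int) (w : Int) (out : Int) : Prop :=
  ¬ D_get_ul_top matrix h_ w → out = get_ul_top_alt matrix h_ w
instance (matrix : List (List Int)) (h_ : Int) (w : Int) (out : Int) : Decidable (Spec_get_ul_top matrix h_ w out) := by unfold Spec_get_ul_top; infer_instance

def pvDiffWitness_get_ul_top : List (List Int) × Int × Int := ([[2, 3]], 0, 2)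
def pvDiffWitnessOut_get_ul_top : Int × Int := (5, 2)

-- ===== CLAIM (what is proved, stated in full; the proofs are below) =====
def Claim_unchanged_get_ul_top : Prop := ∀ (matrix : List (List Int)) (h_ : Int) (w : Int), Dom_get_ul_top matrix h_ w → Pre_get_ul_top matrix h_ w → Spec_get_ul_top matrix h_ w (get_ul_top matrix h_ w)
def Claim_changed_get_ul_top : Prop := Dom_get_ul_top (pvDiffWitness_get_ul_top.1) (pvDiffWitness_get_ul_top.2.1) (pvDiffWitness_get_ul_top.2.2) ∧ Pre_get_ul_top (pvDiffWitness_get_ul_top.1) (pvDiffWitness_get_ul_top.2.1) (pvDiffWitness_get_ul_top.2.2) ∧ D_get_ul_top (pvDiffWitness_get_ul_top.1) (pvDiffWitness_get_ul_top.2.1) (pvDiffWitness_get_ul_top.2.2) ∧ get_ul_top (pvDiffWitness_get_ul_top.1) (pvDiffWitness_get_ul_top.2.1) (pvDiffWitness_get_ul_top.2.2) = pvDiffWitnessOut_get_ul_top.1 ∧ get_ul_top_alt (pvDiffWitness_get_ul_top.1) (pvDiffWitness_get_ul_top.2.1) (pvDiffWitness_get_ul_top.2.2) = pvDiffWitnessOut_get_ul_top.2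 ∧ pvDiffWitnessOut_get_ul_top.1 ≠ pvDiffWitnessOut_get_ul_top.2

-- ===== LEMMAS AND PROOFS =====

-- last row index A reads on the anti-diagonal starting at column p (row 0 is always read)
def pvEp (h_ : Int) (p : Nat) : Nat := if h_ ≤ 1 then 0 else min (h_ - 1).toNat p

-- the product of the cells along one anti-diagonal, as both sides compute it
def pvDiag (m : List (List Int)) (h_ : Int) (p : Nat) : Int :=
  ((List.range (pvEp h_ p + 1)).map (fun x => pvCell m x (p - x))).prod

-- number of cells the while loop reads from state (x, y)
def pvSteps (h_ : Int) (x y : Nat) : Nat :=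
  if h_ ≤ (x : Int) + 1 then 1 else min (h_ - (x : Int) - 1).toNat y + 1

theorem pvLoopA_eq (m : List (List Int)) (h_ : Int) :
    ∀ (y x : Nat) (t : Int),
      pvLoopA m h_ x y t
        = t * ((List.range (pvSteps h_ x y)).map (fun k => pvCell m (x + k) (y - k))).prod := by
  intro y
  induction y with
  | zero =>
    intro x t
    rw [pvLoopA]
    have hs : pvSteps h_ x 0 = 1 := by
      unfold pvSteps; split_ifs <;> omega
    simp [hs]
  | succ y ih =>
    intro x t
    rw [pvLoopA]
    by_cases hc : h_ ≤ (x : Int) + 1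
    · have hs : pvSteps h_ x (y + 1) = 1 := by unfold pvSteps; rw [if_pos hc]
      simp [hc, hs]
    · have hs : pvSteps h_ x (y + 1) = pvSteps h_ (x + 1) y + 1 := by
        unfold pvSteps
        split_ifs <;> (push_cast; omega)
      simp only [hc, false_or, Nat.add_sub_cancel]
      rw [if_neg (by simp), ih, hs, List.range_succ_eq_map]
      simp only [List.map_cons, List.map_map, List.prod_cons]
      have harg : ((fun k => pvCell m (x + k) (y + 1 - k)) ∘ Nat.succ)
          = fun k => pvCell m (x + 1 + k) (y - k) := by
        funext k
        simp only [Function.comp]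
        congr 1 <;> omega
      rw [harg]
      simp only [Nat.sub_zero, Nat.add_zero]
      ring

theorem pvDiag_of_loop (m : List (List Int)) (h_ : Int) (p : Nat) :
    pvLoopA m h_ 0 p 1 = pvDiag m h_ p := by
  rw [pvLoopA_eq]
  have : pvSteps h_ 0 p = pvEp h_ p + 1 := by
    unfold pvSteps pvEp; split_ifs <;> omega
  simp [this, pvDiag]

theorem foldl_add_map (f : Nat → Int) :
    ∀ (l : List Nat) (s : Int), l.foldl (fun s p => s + f p) s = s + (l.map f).sum := by
  intro l
  induction l with
  | nil => simp
  | cons a l ih => intro s; simp [List.foldl_cons, ih, add_assoc]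

-- A equals the sum of the per-diagonal products
theorem getA_eq (m : List (List Int)) (h_ : Int) (w : Int) :
    get_ul_top m h_ w = ((List.range w.toNat).map (pvDiag m h_)).sum := by
  unfold get_ul_top
  rw [foldl_add_map (fun p => pvLoopA m h_ 0 p 1)]
  simp only [zero_add]
  exact congrArg List.sum (List.map_congr_left fun p _ => pvDiag_of_loop m h_ p)

-- B invariant: after folding the first r rows, slot j of the table holds the product of
-- the first min r (j+1) cells of diagonal j
theorem prodTable_eq (m : List (List Int)) (W : Nat) :
    ∀ (r : Nat),
      (List.range r).foldl
        (fun prod i =>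
          let row := m.getD i []
          (List.range W).map
            (fun j => if i ≤ j then prod.getD j 0 * row.getD (j - i) 0 else prod.getD j 0))
        (List.replicate W 1)
      = (List.range W).map
          (fun j => ((List.range (min r (j + 1))).map (fun i => pvCell m i (j - i))).prod) := by
  intro r
  induction r with
  | zero =>
    simp only [List.range_zero, List.foldl_nil, Nat.zero_min, List.map_nil, List.prod_nil]
    rw [List.map_const', List.length_range]
  | succ r ih =>
    rw [List.range_succ, List.foldl_append, ih]
    simp only [List.foldl_cons, List.foldl_nil]
    apply List.map_congr_left
    intro j hj
    simp only [List.mem_range] at hj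
    have hget : ((List.range W).map
        (fun j => ((List.range (min r (j + 1))).map (fun i => pvCell m i (j - i))).prod)).getD j 0
        = ((List.range (min r (j + 1))).map (fun i => pvCell m i (j - i))).prod := by
      rw [List.getD_eq_getElem?_getD, List.getElem?_map, List.getElem?_range hj]
      rfl
    by_cases hij : r ≤ j
    · rw [if_pos hij, hget]
      have h1 : min r (j + 1) = r := by omega
      have h2 : min (r + 1) (j + 1) = r + 1 := by omega
      rw [h1, h2, List.range_succ, List.map_append, List.prod_append]
      simp [pvCell]
    · rw [if_neg hij, hget]
      have : min r (j + 1) = min (r + 1) (j + 1) := by omega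
      rw [this]

-- B equals the same sum of per-diagonal products, provided h_ >= 1
theorem getB_eq (m : List (List Int)) (h_ : Int) (w : Int) (hh : 1 ≤ h_) :
    get_ul_top_alt m h_ w = ((List.range w.toNat).map (pvDiag m h_)).sum := by
  unfold get_ul_top_alt
  by_cases hw : w ≤ 0
  · rw [if_pos hw]
    have : w.toNat = 0 := by omega
    simp [this]
  · rw [if_neg hw]
    simp only
    rw [prodTable_eq m w.toNat ((min h_ w).toNat)]
    congr 1
    apply List.map_congr_left
    intro j hj
    simp only [List.mem_range] at hj
    have hm : min ((min h_ w).toNat) (j + 1) = pvEp h_ j + 1 := by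
      unfold pvEp
      by_cases hc : h_ ≤ 1
      · have h1 : (min h_ w).toNat = 1 := by omega
        rw [h1, if_pos hc]
        omega
      · have h1 : (min h_ w).toNat = min h_.toNat w.toNat := by omega
        rw [h1, if_neg hc]
        omega
    rw [hm]
    rfl

-- ===== VERDICT (by name: the statements are the Claim_ definitions above) =====
theorem get_ul_top_spec : Claim_unchanged_get_ul_top := by
  intro matrix h_ w _ _
  unfold Spec_get_ul_top D_get_ul_top
  intro hnd
  by_cases hw : w ≤ 0
  · have hz : w.toNat = 0 := by omega
    unfold get_ul_top get_ul_top_alt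
    rw [if_pos hw]
    simp [hz]
  · have hh : 1 ≤ h_ := by omega
    rw [getA_eq, getB_eq matrix h_ w hh]

theorem get_ul_top_changed : Claim_changed_get_ul_top := by
  unfold Claim_changed_get_ul_top
  refine ⟨by decide, by decide, by decide, ?_, by decide, by decide⟩
  rw [getA_eq]
  decide
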